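-- pv_equiv track=rewrite | github.com/rafche/python_course | 2_second_lesson/exercise/ex_2_8.py | available_letters
-- ===== SOURCE A (Python) =====
-- def available_letters(letters_guessed):
--     '''
--     :param letters_guessed: list of guessed letters
--     :return: available letters
--     '''
--     alphabet = ['a', 'b', 'c', 'd', 'e', 'f', 'g',
--                 'h', 'i', 'j', 'k', 'l', 'm', 'n',
--                 'o', 'p', 'q', 'r', 's', 't', 'u',
--                 'v', 'w', 'x', 'y', 'z']
--     diff = []
--     diff_formated = ''
--
--     for letter in alphabet:
--         if letter in letters_guessed:
--             diff.append('_')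
--         else:
--             diff.append(letter)
--
--     for idx, element in enumerate(diff):
--         if (idx + 1) % 5 == 0:
--             diff_formated += element + ' ' + '\n'
--         else:
--             diff_formated += element + ' '
--
--     return diff_formated
-- ===== SOURCE B (Python) =====
-- def available_letters(letters_guessed):
--     '''
--     :param letters_guessed: list of guessed letters
--     :return: available letters
--     '''
--     alphabet = 'abcdefghijklmnopqrstuvwxyz'
--     chars = ['_' if c in letters_guessed else c for c in alphabet]
--     rows = []
--     for i in range(0, 26, 5):
--         row = chars[i:i + 5]
--         rows.append(' '.join(row) + ' ')
--         if len(row) == 5: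
--             rows.append('\n')
--     return ''.join(rows)
-- ===== Notes on version B (the rewrite author's own statement) =====
-- stated objective: idiomatic
-- what changed: Replaced A's append-loop plus enumerate-with-modulo-counter formatting by a list comprehension over the alphabet string and chunking the display characters into rows of five joined with ' ', appending '\n' only after full rows.
import Mathlib
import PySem

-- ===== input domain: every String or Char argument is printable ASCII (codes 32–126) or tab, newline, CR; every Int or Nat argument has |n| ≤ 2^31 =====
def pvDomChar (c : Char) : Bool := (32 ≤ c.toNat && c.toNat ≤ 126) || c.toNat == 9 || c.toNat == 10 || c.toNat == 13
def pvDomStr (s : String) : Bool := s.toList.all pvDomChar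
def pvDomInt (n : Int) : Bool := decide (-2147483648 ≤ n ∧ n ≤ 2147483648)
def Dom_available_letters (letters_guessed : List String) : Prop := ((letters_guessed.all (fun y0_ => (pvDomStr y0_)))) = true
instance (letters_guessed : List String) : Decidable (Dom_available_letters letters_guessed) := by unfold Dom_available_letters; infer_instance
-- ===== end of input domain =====

-- B replaces A's two-pass build-then-modulo-counter formatting with a comprehension plus
-- chunking into rows of five joined by ' '; a different decomposition of the same task (same cost).

-- ===== PORT A =====
def available_letters (letters_guessed : List String) : String :=
  let alphabet : List String := ["a", "b", "c", "d", "e", "f", "g",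
                                 "h", "i", "j", "k", "l", "m", "n",
                                 "o", "p", "q", "r", "s", "t", "u",
                                 "v", "w", "x", "y", "z"]
  let diff : List String := alphabet.foldl
    (fun d letter => if letters_guessed.contains letter then d ++ ["_"] else d ++ [letter]) []
  let diff_formated : String := (PySem.List.enumerate diff 0).foldl
    (fun s p => if (p.1 + 1) % 5 == 0 then s ++ p.2 ++ " " ++ "\n" else s ++ p.2 ++ " ") ""
  diff_formated

-- ===== PORT B =====
def available_letters_alt (letters_guessed : List String) : String :=
  let alphabet : String := "abcdefghijklmnopqrstuvwxyz"
  let chars : List String := alphabet.toList.map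
    (fun c => if letters_guessed.contains (String.ofList [c]) then "_" else String.ofList [c])
  let rows : List String := (PySem.List.pyRange 0 26 5).foldl
    (fun acc i =>
      let row := PySem.List.slice chars (some i) (some (i + 5))
      (acc ++ [PySem.Str.join " " row ++ " "]) ++ (if row.length == 5 then ["\n"] else [])) []
  PySem.Str.join "" rows

-- ===== PRECONDITION & SPEC =====
def Spec_available_letters (letters_guessed : List String) (out : String) : Prop := out = available_letters_alt letters_guessed
instance (letters_guessed : List String) (out : String) : Decidable (Spec_available_letters letters_guessed out) := by unfold Spec_available_letters; infer_instance

-- ===== CLAIM (what is proved, stated in full; the proofs are below) =====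
def Claim_equal_available_letters : Prop := ∀ (letters_guessed : List String), Dom_available_letters letters_guessed → Spec_available_letters letters_guessed (available_letters letters_guessed)

-- ===== LEMMAS AND PROOFS =====

-- Both formatting passes produce the same string on any 26 display strings.
theorem pv_fmt26 (x0 x1 x2 x3 x4 x5 x6 x7 x8 x9 x10 x11 x12 x13 x14 x15 x16 x17 x18 x19 x20 x21 x22 x23 x24 x25 : String) :
    (PySem.List.enumerate [x0,x1,x2,x3,x4,x5,x6,x7,x8,x9,x10,x11,x12,x13,x14,x15,x16,x17,x18,x19,x20,x21,x22,x23,x24,x25] 0).foldl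
      (fun s p => if (p.1 + 1) % 5 == 0 then s ++ p.2 ++ " " ++ "\n" else s ++ p.2 ++ " ") "" =
    PySem.Str.join ""
      ((PySem.List.pyRange 0 26 5).foldl
        (fun acc i =>
          let row := PySem.List.slice [x0,x1,x2,x3,x4,x5,x6,x7,x8,x9,x10,x11,x12,x13,x14,x15,x16,x17,x18,x19,x20,x21,x22,x23,x24,x25] (some i) (some (i + 5))
          (acc ++ [PySem.Str.join " " row ++ " "]) ++ (if row.length == 5 then ["\n"] else [])) []) := by
  rw [← String.toList_inj]
  simp [PySem.List.enumerate, PySem.List.pyRange, PySem.List.slice, PySem.List.clampIdx,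
        PySem.Str.join, List.range_succ, List.foldl, PySem.Chars.join, List.intercalate,
        List.intersperse, List.flatten, List.append_assoc]

-- ===== VERDICT (by name: the statement is the Claim_ definition above) =====
theorem available_letters_spec : Claim_equal_available_letters := by
  intro lg _
  unfold Spec_available_letters available_letters available_letters_alt
  simp only []
  rw [PySem.List.foldl_congr_mem _
        (g := fun (d : List String) (letter : String) =>
          d ++ [if lg.contains letter then "_" else letter]) _ _
        (by intro acc x _; dsimp only; split <;> rfl),
      PySem.List.foldl_append_singleton_eq_map]
  have hchars : ("abcdefghijklmnopqrstuvwxyz".toList.map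
      (fun c => if lg.contains (String.ofList [c]) then "_" else String.ofList [c])) =
      (["a", "b", "c", "d", "e", "f", "g", "h", "i", "j", "k", "l", "m",
        "n", "o", "p", "q", "r", "s", "t", "u", "v", "w", "x", "y", "z"] : List String).map
      (fun letter => if lg.contains letter then "_" else letter) := rfl
  rw [hchars]
  simp only [List.map, List.nil_append]
  exact pv_fmt26 _ _ _ _ _ _ _ _ _ _ _ _ _ _ _ _ _ _ _ _ _ _ _ _ _ _
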